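-- pv_equiv track=rewrite | github.com/kajala/django-jacc | jacc/format.py | align_lines
-- ===== SOURCE A (Python) =====
-- from typing import List
--
-- def align_lines(lines: list, column_separator: str = "|") -> List[str]:
--     """
--     Pads lines so that all rows in single column match. Columns separated by '|' in every line.
--     :param lines: list of lines
--     :param column_separator: column separator. default is '|'
--     :return: list of lines
--     """
--     rows = []
--     col_len: List[int] = []
--     for line in lines:
--         line = str(line)
--         cols = []
--         for col_index, col in enumerate(line.split(column_separator)):
--             col = str(col).strip()
--             cols.append(col)
--             if col_index >= len(col_len):
--                 col_len.append(0)
--             col_len[col_index] = max(col_len[col_index], len(col))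
--         rows.append(cols)
--
--     lines_out: List[str] = []
--     for row in rows:
--         cols_out = []
--         for col_index, col in enumerate(row):
--             if col_index == 0:
--                 col = col.ljust(col_len[col_index])
--             else:
--                 col = col.rjust(col_len[col_index])
--             cols_out.append(col)
--         lines_out.append(" ".join(cols_out))
--     return lines_out
-- ===== SOURCE B (Python) =====
-- from typing import List
--
-- def align_lines(lines: list, column_separator: str = "|") -> List[str]:
--     """Column-major construction: after parsing the stripped table, build every
--     output line incrementally one column at a time (pad the column against its
--     own max, append to the lines that have that column); no widths table is
--     kept and no final join pass is made."""
--     rows = [[c.strip() for c in str(line).split(column_separator)] for line in lines]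
--     outs = ["" for _ in rows]
--     for j in range(max((len(r) for r in rows), default=0)):
--         col = [r[j] if j < len(r) else None for r in rows]
--         w = max(len(c) for c in col if c is not None)
--         outs = [o if c is None
--                 else (c.ljust(w) if j == 0 else o + " " + c.rjust(w))
--                 for o, c in zip(outs, col)]
--     return outs
-- ===== Notes on version B (the rewrite author's own statement) =====
-- stated objective: alternative
-- what changed: A is row-major: it accumulates a col_len widths table while parsing, then makes a second per-row pass that pads every cell and joins it; B is column-major: after parsing the table it builds each output line incrementally, one column per iteration (pad that column against its own max and append it to every line that has it), so no widths table is materialized and no join pass exists.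
import Mathlib
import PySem

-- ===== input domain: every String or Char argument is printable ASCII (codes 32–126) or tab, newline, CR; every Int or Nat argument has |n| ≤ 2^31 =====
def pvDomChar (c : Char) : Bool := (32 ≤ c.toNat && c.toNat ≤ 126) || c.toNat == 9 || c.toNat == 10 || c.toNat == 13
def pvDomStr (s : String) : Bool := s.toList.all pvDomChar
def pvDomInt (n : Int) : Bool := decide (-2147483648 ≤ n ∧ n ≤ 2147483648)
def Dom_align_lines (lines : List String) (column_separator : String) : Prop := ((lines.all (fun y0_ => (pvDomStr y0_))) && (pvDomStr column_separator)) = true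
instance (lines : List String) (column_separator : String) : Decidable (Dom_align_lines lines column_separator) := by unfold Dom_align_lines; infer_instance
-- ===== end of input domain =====

-- B replaces A's row-major two-pass scheme (widths accumulated while parsing, then pad+join
-- per row) by a column-major construction: each output line is grown one padded column at a
-- time, with no widths table and no join pass — an alternative decomposition of equal cost.

-- ===== PORT A =====
-- s.ljust(w) / s.rjust(w): space padding (exact for any string; PySem has no ljust/rjust)
def pyLJust (s : String) (w : Nat) : String :=
  String.ofList (s.toList ++ List.replicate (w - s.toList.length) ' ')
def pyRJust (s : String) (w : Nat) : String :=
  String.ofList (List.replicate (w - s.toList.length) ' ' ++ s.toList)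

-- body of A's inner `for col_index, col in enumerate(line.split(...))` loop
def stepA (st2 : List String × List Nat) (p : Int × String) : List String × List Nat :=
  let col := PySem.Str.strip p.2
  let cols := st2.1 ++ [col]
  let colLen := if (st2.2.length : Int) ≤ p.1 then st2.2 ++ [0] else st2.2
  (cols, colLen.set p.1.toNat (max (PySem.List.pyGetD colLen p.1 0) (PySem.Str.len col).toNat))

-- body of A's outer `for line in lines` loop
def lineA (column_separator : String) (st : List (List String) × List Nat) (line : String) :
    List (List String) × List Nat :=
  let pieces := (PySem.Str.split? line column_separator).getD []
  let inner := (PySem.List.enumerate pieces).foldl stepA ([], st.2)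
  (st.1 ++ [inner.1], inner.2)

def align_lines (lines : List String) (column_separator : String) : List String :=
  let st := lines.foldl (lineA column_separator) ([], [])
  st.1.foldl (fun out row =>
    let colsOut := (PySem.List.enumerate row).foldl (fun (acc : List String) p =>
      let c := if p.1 == 0 then pyLJust p.2 (PySem.List.pyGetD st.2 p.1 0)
               else pyRJust p.2 (PySem.List.pyGetD st.2 p.1 0)
      acc ++ [c]
      ) []
    out ++ [PySem.Str.join " " colsOut]) []

-- ===== PORT B =====
-- body of B's `for j in range(...)` loop: pad column j and append it to the output lines.
-- `r[j] if j < len(r) else None` is `r[j]?`; the inner `max(...)` generator is never empty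
-- for j in range (some row has that column), so maxD's default is never used.
def stepB (rows : List (List String)) (outs : List String) (j : Nat) : List String :=
  let col := rows.map (fun r => r[j]?)
  let w := PySem.List.maxD (col.filterMap (fun c => c.map (fun s => (PySem.Str.len s).toNat)))
            (fun x => x) 0
  (outs.zip col).map (fun p =>
    match p.2 with
    | none => p.1
    | some c => if j == 0 then pyLJust c w else p.1 ++ " " ++ pyRJust c w)

def align_lines_alt (lines : List String) (column_separator : String) : List String :=
  let rows := lines.map (fun line =>
    ((PySem.Str.split? line column_separator).getD []).map PySem.Str.strip)
  let outs0 := rows.map (fun _ => "")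
  (List.range (PySem.List.maxD (rows.map (fun r => r.length)) (fun x => x) 0)).foldl
    (stepB rows) outs0

-- ===== PRECONDITION & SPEC =====
-- A raises ValueError ("empty separator") when column_separator = "" and some line is
-- actually split (lines nonempty); so does B.
def Pre_align_lines (lines : List String) (column_separator : String) : Prop :=
  lines = [] ∨ column_separator ≠ ""
instance (lines : List String) (column_separator : String) :
    Decidable (Pre_align_lines lines column_separator) := by unfold Pre_align_lines; infer_instance
def pvWitness_align_lines : List String × String := (["a|bb|c", "dd | e"], "|")

def Spec_align_lines (lines : List String) (column_separator : String) (out : List String) : Prop :=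
  out = align_lines_alt lines column_separator
instance (lines : List String) (column_separator : String) (out : List String) :
    Decidable (Spec_align_lines lines column_separator out) := by unfold Spec_align_lines; infer_instance

-- ===== CLAIM (what is proved, stated in full; the proofs are below) =====
def Claim_equal_align_lines : Prop := ∀ (lines : List String) (column_separator : String), Dom_align_lines lines column_separator → Pre_align_lines lines column_separator → Spec_align_lines lines column_separator (align_lines lines column_separator)

-- ===== LEMMAS AND PROOFS =====

-- stripped cell row of one line
def cellsOf (column_separator line : String) : List String :=
  ((PySem.Str.split? line column_separator).getD []).map PySem.Str.strip

-- cell length as both ports compute it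
def lenN (s : String) : Nat := (PySem.Str.len s).toNat

-- pointwise max of two width lists (the effect of A's inner loop on col_len)
def mergeW : List Nat → List Nat → List Nat
  | acc, [] => acc
  | [], n :: t => n :: mergeW [] t
  | a :: as, n :: t => max a n :: mergeW as t

-- A's final col_len
def widthsOf (rows : List (List String)) : List Nat :=
  (rows.map (fun r => r.map lenN)).foldl mergeW []

-- A's padding of one enumerated cell
def padFn (W : List Nat) (p : Int × String) : String :=
  if p.1 == 0 then pyLJust p.2 (PySem.List.pyGetD W p.1 0)
  else pyRJust p.2 (PySem.List.pyGetD W p.1 0)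

-- rendering of the first m cells of a row (B's invariant state)
def renderTake (W : List Nat) (r : List String) (m : Nat) : String :=
  PySem.Str.join " " (((PySem.List.enumerate r).take m).map (padFn W))

lemma foldl_push {α β : Type} (f : α → β) (xs : List α) (acc : List β) :
    xs.foldl (fun a x => a ++ [f x]) acc = acc ++ xs.map f := by
  induction xs generalizing acc <;> simp_all

lemma stepA_append (cols : List String) (colLen : List Nat) (p : String) (k : Nat)
    (heq : colLen.length = k) :
    stepA (cols, colLen) ((k : Int), p) =
      (cols ++ [PySem.Str.strip p], colLen ++ [lenN (PySem.Str.strip p)]) := by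
  simp only [stepA, lenN]
  rw [if_pos (by exact_mod_cast Nat.le_of_eq heq)]
  rw [Int.toNat_natCast]
  have h1 : PySem.List.pyGetD (colLen ++ [0]) (k : Int) 0 = 0 := by
    rw [PySem.List.pyGetD_natCast, List.getD_eq_getElem?_getD, List.getElem?_append_right (by omega)]
    simp [heq]
  rw [h1]
  simp only [Nat.zero_max]
  rw [List.set_append_right _ _ (by omega)]
  simp [heq]

lemma stepA_set (cols : List String) (colLen : List Nat) (p : String) (k : Nat)
    (hlt : k < colLen.length) :
    stepA (cols, colLen) ((k : Int), p) =
      (cols ++ [PySem.Str.strip p], colLen.set k (max (colLen.getD k 0) (lenN (PySem.Str.strip p)))) := by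
  simp only [stepA, lenN]
  rw [if_neg (by exact_mod_cast Nat.not_le_of_lt hlt)]
  rw [Int.toNat_natCast, PySem.List.pyGetD_natCast]

lemma inner_spec (pieces : List String) (k : Nat) (cols : List String) (colLen : List Nat)
    (hk : k ≤ colLen.length) :
    (PySem.List.enumerate pieces (k : Int)).foldl stepA (cols, colLen) =
      (cols ++ pieces.map PySem.Str.strip,
       colLen.take k ++ mergeW (colLen.drop k) (pieces.map (fun s => lenN (PySem.Str.strip s)))) := by
  induction pieces generalizing k cols colLen with
  | nil => simp [PySem.List.enumerate, mergeW]
  | cons p t ih =>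
    have hcons : PySem.List.enumerate (p :: t) (k : Int)
        = ((k : Int), p) :: PySem.List.enumerate t ((k + 1 : Nat) : Int) := by
      push_cast
      simp [PySem.List.enumerate]
    rw [hcons, List.foldl_cons]
    by_cases heq : colLen.length = k
    · rw [stepA_append cols colLen p k heq,
        ih (k+1) _ _ (by simp [heq])]
      rw [List.take_of_length_le (by simp [heq]), List.drop_of_length_le (by simp [heq]),
        List.take_of_length_le (by omega), List.drop_of_length_le (by omega)]
      subst heq
      simp [mergeW]
    · have hlt : k < colLen.length := by omega
      rw [stepA_set cols colLen p k hlt, ih (k+1) _ _ (by simp; omega)]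
      rw [List.set_eq_take_append_cons_drop, if_pos hlt]
      have hTk : (colLen.take k).length = k := by simp; omega
      have h2 : (colLen.take k ++ max (colLen.getD k 0) (lenN (PySem.Str.strip p)) :: colLen.drop (k+1)).take (k+1)
          = colLen.take k ++ [max (colLen.getD k 0) (lenN (PySem.Str.strip p))] := by
        rw [List.take_append, List.take_of_length_le (by omega), hTk]
        simp
      have h3 : (colLen.take k ++ max (colLen.getD k 0) (lenN (PySem.Str.strip p)) :: colLen.drop (k+1)).drop (k+1)
          = colLen.drop (k+1) := by
        rw [List.drop_append, List.drop_of_length_le (by omega), hTk]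
        simp
      rw [h2, h3]
      have hdk : colLen.drop k = colLen.getD k 0 :: colLen.drop (k+1) := by
        rw [List.getD_eq_getElem?_getD, List.getElem?_eq_getElem hlt, Option.getD_some]
        exact List.drop_eq_getElem_cons hlt
      rw [hdk]
      simp [mergeW]

lemma lineA_spec (sep line : String) (rows0 : List (List String)) (colLen0 : List Nat) :
    lineA sep (rows0, colLen0) line
      = (rows0 ++ [cellsOf sep line], mergeW colLen0 ((cellsOf sep line).map lenN)) := by
  simp only [lineA, cellsOf]
  have h := inner_spec ((PySem.Str.split? line sep).getD []) 0 [] colLen0 (by omega)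
  rw [show ((0 : Nat) : Int) = 0 by simp] at h
  rw [h]
  simp [List.map_map, Function.comp_def]

lemma pass1 (sep : String) (ls : List String) (rows0 : List (List String)) (colLen0 : List Nat) :
    ls.foldl (lineA sep) (rows0, colLen0) =
      (rows0 ++ ls.map (cellsOf sep),
       ((ls.map (cellsOf sep)).map (fun r => r.map lenN)).foldl mergeW colLen0) := by
  induction ls generalizing rows0 colLen0 with
  | nil => simp
  | cons l t ih =>
    rw [List.foldl_cons, lineA_spec, ih]
    simp

lemma getD_mergeW (a b : List Nat) (i : Nat) :
    (mergeW a b).getD i 0 = max (a.getD i 0) (b.getD i 0) := by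
  induction a generalizing b i with
  | nil =>
    induction b generalizing i with
    | nil => simp [mergeW]
    | cons y ys ihb => cases i <;> simp_all [mergeW]
  | cons x xs ih =>
    cases b with
    | nil => simp [mergeW]
    | cons y ys => cases i <;> simp_all [mergeW]

lemma maxD_id_eq_foldl (xs : List Nat) :
    PySem.List.maxD xs (fun x => x) 0 = xs.foldl max 0 := by
  cases xs with
  | nil => simp [PySem.List.maxD, PySem.List.max?]
  | cons x t =>
    simp only [PySem.List.maxD, PySem.List.max?_id_cons, Option.getD_some, List.foldl_cons,
      Nat.zero_max]

lemma getD_foldl_mergeW (L : List (List Nat)) (c : List Nat) (i : Nat) :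
    (L.foldl mergeW c).getD i 0 = (L.map (fun l => l.getD i 0)).foldl max (c.getD i 0) := by
  induction L generalizing c with
  | nil => rfl
  | cons l t ih => rw [List.map_cons, List.foldl_cons, List.foldl_cons, ih, getD_mergeW]

-- the present cells of column j, with their lengths
lemma filterMap_col (rows : List (List String)) (j : Nat) :
    (rows.map (fun r => r[j]?)).filterMap (fun c => c.map lenN)
      = (rows.filter (fun r => decide (j < r.length))).map (fun r => lenN (r.getD j "")) := by
  induction rows with
  | nil => rfl
  | cons r t ih =>
    by_cases h : j < r.length
    · rw [List.map_cons, List.filterMap_cons, List.getElem?_eq_getElem h,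
        List.filter_cons_of_pos (by simpa using h), List.map_cons, ih]
      simp [List.getD_eq_getElem?_getD, List.getElem?_eq_getElem h]
    · rw [List.map_cons, List.filterMap_cons, List.getElem?_eq_none (by omega),
        List.filter_cons_of_neg (by simpa using h), ih]
      rfl

lemma foldl_max_filter (rows : List (List String)) (i : Nat) (acc : Nat) :
    ((rows.filter (fun r => decide (i < r.length))).map
        (fun r => lenN (r.getD i ""))).foldl max acc
      = ((rows.map (fun r => r.map lenN)).map (fun l => l.getD i 0)).foldl max acc := by
  induction rows generalizing acc with
  | nil => rfl
  | cons r t ih =>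
    by_cases h : i < r.length
    · rw [List.filter_cons_of_pos (by simpa using h), List.map_cons, List.foldl_cons,
        List.map_cons, List.map_cons, List.foldl_cons, ih]
      congr 2
      simp [lenN, List.getD_eq_getElem?_getD, h]
    · rw [List.filter_cons_of_neg (by simpa using h), List.map_cons, List.map_cons,
        List.foldl_cons, ih]
      have hz : (r.map lenN).getD i 0 = 0 := by
        simp [List.getD_eq_getElem?_getD, List.getElem?_eq_none
          (by simpa using (Nat.le_of_not_lt h) : (r.map lenN).length ≤ i)]
      rw [hz, Nat.max_zero]

-- B's per-column width equals A's col_len entry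
lemma width_eq (rows : List (List String)) (j : Nat) :
    PySem.List.maxD ((rows.map (fun r => r[j]?)).filterMap
        (fun c => c.map (fun s => (PySem.Str.len s).toNat))) (fun x => x) 0
      = (widthsOf rows).getD j 0 := by
  have : (fun (s : String) => (PySem.Str.len s).toNat) = lenN := rfl
  rw [this, maxD_id_eq_foldl, filterMap_col, foldl_max_filter, widthsOf,
    getD_foldl_mergeW]
  rfl

lemma zip_map_map {α β γ δ : Type} (l : List α) (f : α → β) (g : α → γ) (h : β × γ → δ) :
    ((l.map f).zip (l.map g)).map h = l.map (fun x => h (f x, g x)) := by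
  induction l with
  | nil => rfl
  | cons x t ih => simp [ih]

lemma cjoin_snoc (s : List Char) (xs : List (List Char)) (x : List Char) :
    PySem.Chars.join s (xs ++ [x])
      = if xs.isEmpty then x else PySem.Chars.join s xs ++ s ++ x := by
  induction xs with
  | nil => simp [PySem.Chars.join_singleton]
  | cons y t ih =>
    cases t with
    | nil => simp [PySem.Chars.join_cons_cons, PySem.Chars.join_singleton]
    | cons z t2 =>
      simp only [List.cons_append, PySem.Chars.join_cons_cons]
      rw [show z :: (t2 ++ [x]) = (z :: t2) ++ [x] from rfl, ih]
      simp [List.append_assoc]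

lemma join_snoc (xs : List String) (x : String) :
    PySem.Str.join " " (xs ++ [x])
      = if xs.isEmpty then x else PySem.Str.join " " xs ++ " " ++ x := by
  apply String.toList_injective
  by_cases h : xs.isEmpty
  · simp [PySem.Str.toList_join, List.isEmpty_iff.mp h]
  · simp only [h, if_neg, Bool.false_eq_true, not_false_iff, PySem.Str.toList_join,
      List.map_append, List.map_cons, List.map_nil, cjoin_snoc, String.toList_append]
    have h2 : (xs.map String.toList).isEmpty = false := by cases xs <;> simp_all
    simp [h2]

lemma renderTake_zero (W : List Nat) (r : List String) : renderTake W r 0 = "" := rfl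

lemma renderTake_succ_of_lt (W : List Nat) (r : List String) (j : Nat) (h : j < r.length) :
    renderTake W r (j + 1)
      = if j == 0 then pyLJust r[j] (W.getD j 0)
        else renderTake W r j ++ " " ++ pyRJust r[j] (W.getD j 0) := by
  simp only [renderTake]
  have he : (PySem.List.enumerate r)[j]? = some ((j : Int), r[j]) := by
    rw [PySem.List.getElem?_enumerate, List.getElem?_eq_getElem h]
    simp
  rw [List.take_succ, he]
  simp only [Option.toList_some, List.map_append, List.map_cons, List.map_nil]
  rw [join_snoc]
  have hpad : padFn W ((j : Int), r[j])
      = if j == 0 then pyLJust r[j] (W.getD j 0) else pyRJust r[j] (W.getD j 0) := by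
    simp only [padFn, PySem.List.pyGetD_natCast]
    by_cases hj : j = 0 <;> simp [hj]
  by_cases hj : j = 0
  · subst hj
    rw [show (0:Int) = ((0:Nat):Int) from rfl, hpad]
    simp [List.getD_eq_getElem?_getD]
  · have hlen : (((PySem.List.enumerate r).take j).map (padFn W)).isEmpty = false := by
      rw [List.isEmpty_eq_false_iff]
      simp only [ne_eq, List.map_eq_nil_iff, List.take_eq_nil_iff]
      push_neg
      constructor
      · omega
      · rw [← List.length_pos_iff, PySem.List.length_enumerate]; omega
    rw [hlen]
    simp [hpad, hj]

lemma renderTake_of_le (W : List Nat) (r : List String) (j : Nat) (h : r.length ≤ j) :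
    renderTake W r j = renderTake W r r.length := by
  simp only [renderTake]
  rw [List.take_of_length_le (by rw [PySem.List.length_enumerate]; omega),
    List.take_of_length_le (by rw [PySem.List.length_enumerate])]

lemma stepB_spec (rows : List (List String)) (j : Nat) :
    stepB rows (rows.map (fun r => renderTake (widthsOf rows) r j)) j
      = rows.map (fun r => renderTake (widthsOf rows) r (j + 1)) := by
  simp only [stepB, width_eq, zip_map_map]
  apply List.map_congr_left
  intro r _
  by_cases h : j < r.length
  · rw [List.getElem?_eq_getElem h]
    simp only [renderTake_succ_of_lt (widthsOf rows) r j h]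
  · rw [List.getElem?_eq_none (by omega)]
    have h1 : renderTake (widthsOf rows) r (j + 1) = renderTake (widthsOf rows) r j :=
      (renderTake_of_le (widthsOf rows) r (j+1) (by omega)).trans
        (renderTake_of_le (widthsOf rows) r j (by omega)).symm
    rw [h1]

lemma fold_range_spec (rows : List (List String)) (n : Nat) :
    (List.range n).foldl (stepB rows) (rows.map (fun _ => ""))
      = rows.map (fun r => renderTake (widthsOf rows) r n) := by
  induction n with
  | zero => simp [renderTake_zero]
  | succ m ih => rw [List.range_succ, List.foldl_append, ih, List.foldl_cons, List.foldl_nil,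
      stepB_spec]

lemma renderTake_full (W : List Nat) (r : List String) (n : Nat) (h : r.length ≤ n) :
    renderTake W r n = PySem.Str.join " " ((PySem.List.enumerate r).map (padFn W)) := by
  rw [renderTake_of_le W r n h]
  simp only [renderTake]
  rw [List.take_of_length_le (by rw [PySem.List.length_enumerate])]

-- ===== VERDICT (by name: the statement is the Claim_ definition above) =====
theorem align_lines_spec : Claim_equal_align_lines := by
  intro lines sep _ _
  show align_lines lines sep = align_lines_alt lines sep
  simp only [align_lines, align_lines_alt, pass1, List.nil_append]
  have hc : (fun line => ((PySem.Str.split? line sep).getD []).map PySem.Str.strip)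
      = cellsOf sep := rfl
  rw [hc, fold_range_spec]
  simp only [foldl_push, List.nil_append]
  have hmax : ∀ r ∈ lines.map (cellsOf sep),
      r.length ≤ PySem.List.maxD ((lines.map (cellsOf sep)).map (fun r => r.length)) (fun x => x) 0 := by
    intro r hr
    rw [maxD_id_eq_foldl]
    exact (PySem.List.le_foldl_max _ _).2 _ (by simpa using List.mem_map_of_mem hr)
  apply List.map_congr_left
  intro r hr
  rw [renderTake_full _ _ _ (hmax r hr)]
  rfl
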